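-- pv_equiv track=rewrite | github.com/femiayodeji/lyst-cli | app/agent.py | _looks_like_data_request
-- ===== SOURCE A (Python) =====
-- def _looks_like_data_request(message: str) -> bool:
--     text = (message or "").strip().lower()
--     if not text:
--         return False
--
--     indicators = [
--         "how many",
--         "count",
--         "total",
--         "sum",
--         "average",
--         "avg",
--         "report",
--         "list",
--         "show",
--         "monthly",
--         "year",
--         "today",
--         "this month",
--         "this year",
--         "last month",
--         "last year",
--         "users",
--         "subscriptions",
--     ]
--     return any(token in text for token in indicators)
-- ===== SOURCE B (Python) =====
-- def _looks_like_data_request(message: str) -> bool: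
--     text = (message or "").strip().lower()
--     if not text:
--         return False
--
--     indicators = [
--         "how many",
--         "count",
--         "total",
--         "sum",
--         "average",
--         "avg",
--         "report",
--         "list",
--         "show",
--         "monthly",
--         "year",
--         "today",
--         "this month",
--         "this year",
--         "last month",
--         "last year",
--         "users",
--         "subscriptions",
--     ]
--     # single left-to-right scan over text positions; at each position test
--     # each keyword as a prefix (the alternation-automaton order), instead of
--     # one full substring scan of text per keyword
--     return any(text.startswith(tok, i) for i in range(len(text) + 1) for tok in indicators)
-- ===== Notes on version B (the rewrite author's own statement) =====
-- stated objective: alternative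
-- what changed: Replaces the token-major loop (one full 'token in text' substring scan per keyword) by a single position-major left-to-right scan of the text that tests every keyword as a prefix at each position, like the alternation automaton a joined regex would run.
import Mathlib
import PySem

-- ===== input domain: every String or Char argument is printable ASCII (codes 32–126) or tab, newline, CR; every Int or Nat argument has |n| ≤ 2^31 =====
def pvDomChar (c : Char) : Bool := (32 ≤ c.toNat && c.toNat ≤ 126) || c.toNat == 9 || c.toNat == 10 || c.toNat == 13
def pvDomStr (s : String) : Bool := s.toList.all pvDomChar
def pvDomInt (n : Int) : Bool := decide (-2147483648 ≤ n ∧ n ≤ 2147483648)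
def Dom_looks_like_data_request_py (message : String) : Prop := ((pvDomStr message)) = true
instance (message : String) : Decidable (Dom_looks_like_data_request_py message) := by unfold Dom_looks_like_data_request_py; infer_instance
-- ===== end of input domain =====

-- B replaces A's token-major loop (one substring scan per keyword) by a single
-- position-major scan of the text testing each keyword as a prefix — an
-- alternative traversal of the same cost, proved to return the same Bool.

-- ===== PORT A =====
def pvIndicators : List String :=
  ["how many", "count", "total", "sum", "average", "avg", "report", "list",
   "show", "monthly", "year", "today", "this month", "this year",
   "last month", "last year", "users", "subscriptions"]

def looks_like_data_request_py (message : String) : Bool :=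
  -- text = (message or "").strip().lower(); for a str, (message or "") = message
  let text := PySem.Str.lower (PySem.Str.strip message)
  if PySem.Str.len text = 0 then false
  else pvIndicators.any (fun token => PySem.Str.isIn token text)

-- ===== PORT B =====
-- any(text.startswith(tok, i) for i in range(len(text)+1) for tok in indicators):
-- structural recursion over the suffixes of text (positions left to right);
-- at each position every token is tested as a prefix.
def pvScanAlt (toks : List (List Char)) : List Char → Bool
  | [] => toks.any (fun t => t.isEmpty)
  | c :: rest => toks.any (fun t => PySem.Chars.startswith (c :: rest) t) || pvScanAlt toks rest

def looks_like_data_request_py_alt (message : String) : Bool :=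
  let text := PySem.Str.lower (PySem.Str.strip message)
  if PySem.Str.len text = 0 then false
  else pvScanAlt (pvIndicators.map String.toList) text.toList

-- ===== PRECONDITION & SPEC =====
def Spec_looks_like_data_request_py (message : String) (out : Bool) : Prop := out = looks_like_data_request_py_alt message
instance (message : String) (out : Bool) : Decidable (Spec_looks_like_data_request_py message out) := by unfold Spec_looks_like_data_request_py; infer_instance

-- ===== CLAIM (what is proved, stated in full; the proofs are below) =====
def Claim_equal_looks_like_data_request_py : Prop := ∀ (message : String), Dom_looks_like_data_request_py message → Spec_looks_like_data_request_py message (looks_like_data_request_py message)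

-- ===== LEMMAS AND PROOFS =====

-- the position scan finds exactly the tokens that occur as an infix
theorem pvScanAlt_eq_true_iff (toks : List (List Char)) (s : List Char) :
    pvScanAlt toks s = true ↔ ∃ t ∈ toks, t <:+: s := by
  induction s with
  | nil =>
    simp [pvScanAlt, List.any_eq_true, List.isEmpty_iff]
  | cons c rest ih =>
    simp only [pvScanAlt, Bool.or_eq_true, List.any_eq_true, ih,
      PySem.Chars.startswith_iff, List.infix_cons_iff]
    constructor
    · rintro (⟨t, ht, hp⟩ | ⟨t, ht, hi⟩)
      · exact ⟨t, ht, Or.inl hp⟩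
      · exact ⟨t, ht, Or.inr hi⟩
    · rintro ⟨t, ht, hp | hi⟩
      · exact Or.inl ⟨t, ht, hp⟩
      · exact Or.inr ⟨t, ht, hi⟩

theorem pvAny_isIn_eq_scan (toks : List String) (s : List Char) :
    (toks.any fun token => PySem.Chars.isIn token.toList s)
      = pvScanAlt (toks.map String.toList) s := by
  rw [Bool.eq_iff_iff, pvScanAlt_eq_true_iff]
  simp [List.any_eq_true, PySem.Chars.isIn_iff_infix]

-- ===== VERDICT (by name: the statement is the Claim_ definition above) =====
theorem looks_like_data_request_py_spec : Claim_equal_looks_like_data_request_py := by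
  intro message _
  simp only [Spec_looks_like_data_request_py, looks_like_data_request_py,
    looks_like_data_request_py_alt]
  simp
  congr 1
  exact pvAny_isIn_eq_scan _ _
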